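-- pv_equiv track=rewrite | github.com/lucacorbucci/AdventOfCode-2025 | day_3/day_3.py | solution
-- ===== SOURCE A (Python) =====
-- def solution(batteries: list[list[int]]) -> int:
--     output_joltage = 0
--     for bank in batteries:
--         max_right: dict[int, int] = {}
--         current_max = 0
--         for index in range(len(bank) - 2, -1, -1):
--             if index + 1 in max_right:
--                 max_right[index] = max(max_right[index + 1], bank[index + 1])
--             else:
--                 max_right[index] = bank[index + 1]
--         for index in range(len(bank) - 1):
--             current_value = int(str(bank[index]) + str(max_right[index]))
--             current_max = max(current_max, current_value)
--         output_joltage += current_max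
--
--     return output_joltage
-- ===== SOURCE B (Python) =====
-- def solution(batteries: list[list[int]]) -> int:
--     total = 0
--     for bank in batteries:
--         best = 0
--         running = None
--         for i in range(len(bank) - 2, -1, -1):
--             if running is None:
--                 running = bank[i + 1]
--             else:
--                 running = max(running, bank[i + 1])
--             best = max(best, int(str(bank[i]) + str(running)))
--         total += best
--     return total
-- ===== Notes on version B (the rewrite author's own statement) =====
-- stated objective: simpler
-- what changed: B drops A's max_right dict and A's two loops per bank: a single backward loop carries a running suffix maximum and folds the concatenated candidates directly into the bank's best value.
import Mathlib
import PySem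

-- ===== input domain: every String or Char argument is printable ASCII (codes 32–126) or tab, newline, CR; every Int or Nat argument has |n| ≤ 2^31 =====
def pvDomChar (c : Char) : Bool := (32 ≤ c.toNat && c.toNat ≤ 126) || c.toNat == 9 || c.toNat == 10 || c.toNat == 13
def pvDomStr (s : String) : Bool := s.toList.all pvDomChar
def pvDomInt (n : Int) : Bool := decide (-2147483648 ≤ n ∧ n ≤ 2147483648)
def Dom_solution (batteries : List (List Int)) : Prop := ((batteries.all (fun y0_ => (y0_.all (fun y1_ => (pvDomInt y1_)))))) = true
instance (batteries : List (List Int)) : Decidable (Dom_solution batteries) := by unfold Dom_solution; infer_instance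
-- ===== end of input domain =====

-- B replaces A's dict of suffix maxima (built in one pass, read in a second) by a single
-- backward loop per bank carrying a running suffix maximum: simpler, no dict, one pass.

-- ===== PORT A =====
-- int(str(a) + str(b)); 0 where Python raises ValueError (Pre_ excludes those inputs)
def pyConcat (a b : Int) : Int :=
  (PySem.Int.ofStr? (PySem.Int.toStr a ++ PySem.Int.toStr b)).getD 0

def solution (batteries : List (List Int)) : Int :=
  batteries.foldl (fun output_joltage bank =>
    let max_right : PySem.Dict Int Int :=
      (PySem.List.pyRange ((bank.length : Int) - 2) (-1) (-1)).foldl (fun d index =>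
        if d.contains (index + 1) then
          d.insert index (max (d.getD (index + 1) 0) (PySem.List.pyGetD bank (index + 1) 0))
        else
          d.insert index (PySem.List.pyGetD bank (index + 1) 0)) PySem.Dict.empty
    let current_max :=
      (PySem.List.pyRange 0 ((bank.length : Int) - 1) 1).foldl (fun cm index =>
        max cm (pyConcat (PySem.List.pyGetD bank index 0) (max_right.getD index 0))) 0
    output_joltage + current_max) 0

-- ===== PORT B =====
def solution_alt (batteries : List (List Int)) : Int :=
  batteries.foldl (fun total bank =>
    let st :=
      (PySem.List.pyRange ((bank.length : Int) - 2) (-1) (-1)).foldl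
        (fun (p : Int × Option Int) i =>
          let running :=
            match p.2 with
            | none => PySem.List.pyGetD bank (i + 1) 0
            | some r => max r (PySem.List.pyGetD bank (i + 1) 0)
          (max p.1 (pyConcat (PySem.List.pyGetD bank i 0) running), some running))
        (0, none)
    total + st.1) 0

-- ===== PRECONDITION & SPEC =====
-- Pre_ excludes inputs on which Python A RAISES ValueError: a bank of length ≥ 2 whose last
-- element is negative makes every suffix maximum at the end negative, so int(str(x) + str(neg))
-- fails.  (B raises there too; A returns on every input Pre_ admits.)
def Pre_solution (batteries : List (List Int)) : Prop :=
  ∀ bank ∈ batteries, 2 ≤ bank.length → 0 ≤ bank.getLastD 0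
instance (batteries : List (List Int)) : Decidable (Pre_solution batteries) := by
  unfold Pre_solution; infer_instance
def pvWitness_solution : List (List Int) := [[12, 34, 5], [87], []]
def Spec_solution (batteries : List (List Int)) (out : Int) : Prop := out = solution_alt batteries
instance (batteries : List (List Int)) (out : Int) : Decidable (Spec_solution batteries out) := by
  unfold Spec_solution; infer_instance

-- ===== CLAIM (what is proved, stated in full; the proofs are below) =====
def Claim_equal_solution : Prop := ∀ (batteries : List (List Int)), Dom_solution batteries → Pre_solution batteries → Spec_solution batteries (solution batteries)

-- ===== LEMMAS AND PROOFS =====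

-- maximum of a nonempty suffix list (0 for [])
def sfx : List Int → Int
  | [] => 0
  | [y] => y
  | y :: z :: ys => max y (sfx (z :: ys))

-- max of bank[i+1:], the value A stores in max_right[i]
def sufmax (bank : List Int) (i : Nat) : Int := sfx (bank.drop (i + 1))

-- the candidate value A and B both form at index i
def cval (bank : List Int) (i : Int) : Int :=
  pyConcat (PySem.List.pyGetD bank i 0) (sufmax bank i.toNat)

theorem sfx_cons (y : Int) (l : List Int) (h : l ≠ []) : sfx (y :: l) = max y (sfx l) := by
  cases l with
  | nil => exact absurd rfl h
  | cons z ys => rfl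

theorem sufmax_last (bank : List Int) (a : Nat) (h : a + 2 = bank.length) :
    sufmax bank a = PySem.List.pyGetD bank ((a : Int) + 1) 0 := by
  unfold sufmax
  have h1 : a + 1 < bank.length := by omega
  rw [List.drop_eq_getElem_cons h1, List.drop_eq_nil_of_le (by omega)]
  rw [PySem.List.pyGetD_eq_getElem bank 0 (by omega) (by omega)]
  have ht : ((a : Int) + 1).toNat = a + 1 := by omega
  simp [sfx, ht]

theorem sufmax_step (bank : List Int) (a : Nat) (h : a + 3 ≤ bank.length) :
    sufmax bank a = max (PySem.List.pyGetD bank ((a : Int) + 1) 0) (sufmax bank (a + 1)) := by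
  unfold sufmax
  have h1 : a + 1 < bank.length := by omega
  rw [List.drop_eq_getElem_cons h1, sfx_cons _ _ (by simp [List.drop_eq_nil_iff]; omega)]
  rw [PySem.List.pyGetD_eq_getElem bank 0 (by omega) (by omega)]
  have ht : ((a : Int) + 1).toNat = a + 1 := by omega
  simp [ht]

theorem running_upd (bank : List Int) (a : Nat) (h : a + 3 ≤ bank.length) :
    max (sufmax bank (a + 1)) (PySem.List.pyGetD bank ((a : Int) + 1) 0) = sufmax bank a := by
  rw [sufmax_step bank a h, max_comm]

-- one step of A's dict-building loop preserves the characterisation of max_right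
theorem dict_step (bank : List Int) (a : Nat) (ha : (a : Int) ≤ (bank.length : Int) - 2)
    (d : PySem.Dict Int Int)
    (hd : ∀ j : Int, d.get? j =
      if (a : Int) < j ∧ j ≤ (bank.length : Int) - 2 then some (sufmax bank j.toNat) else none) :
    ∀ j : Int,
      ((if d.contains ((a : Int) + 1) then
          d.insert (a : Int) (max (d.getD ((a : Int) + 1) 0) (PySem.List.pyGetD bank ((a : Int) + 1) 0))
        else
          d.insert (a : Int) (PySem.List.pyGetD bank ((a : Int) + 1) 0)) : PySem.Dict Int Int).get? j =
      if (a : Int) - 1 < j ∧ j ≤ (bank.length : Int) - 2 then some (sufmax bank j.toNat) else none := by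
  intro j
  have hg1 := hd ((a : Int) + 1)
  have hres :
      (if d.contains ((a : Int) + 1) then
          d.insert (a : Int) (max (d.getD ((a : Int) + 1) 0) (PySem.List.pyGetD bank ((a : Int) + 1) 0))
        else
          d.insert (a : Int) (PySem.List.pyGetD bank ((a : Int) + 1) 0)) =
      d.insert (a : Int) (sufmax bank a) := by
    by_cases hc : (a : Int) + 1 ≤ (bank.length : Int) - 2
    · rw [if_pos (by omega : (a : Int) < (a : Int) + 1 ∧ (a : Int) + 1 ≤ (bank.length : Int) - 2)] at hg1
      have hcon : d.contains ((a : Int) + 1) = true := by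
        rw [PySem.Dict.contains_eq_isSome_get?, hg1]; rfl
      rw [if_pos hcon, PySem.Dict.getD_eq_get?_getD, hg1]
      have ht : ((a : Int) + 1).toNat = a + 1 := by omega
      simp only [Option.getD_some, ht]
      rw [running_upd bank a (by omega)]
    · rw [if_neg (by omega)] at hg1
      have hcon : d.contains ((a : Int) + 1) = false := by
        rw [PySem.Dict.contains_eq_isSome_get?, hg1]; rfl
      rw [if_neg (by simp [hcon])]
      rw [sufmax_last bank a (by omega)]
  rw [hres, PySem.Dict.get?_insert]
  by_cases hj : j = (a : Int)
  · subst hj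
    rw [if_pos rfl, if_pos (by omega)]
    have : ((a : Int)).toNat = a := by omega
    rw [this]
  · rw [if_neg hj, hd j]
    by_cases h1 : (a : Int) < j ∧ j ≤ (bank.length : Int) - 2
    · rw [if_pos h1, if_pos (by omega)]
    · rw [if_neg h1, if_neg (by omega)]

-- A's whole dict-building loop: max_right maps every i ∈ [0, n-2] to the suffix max
theorem dict_inv (bank : List Int) : ∀ (a : Nat), (a : Int) ≤ (bank.length : Int) - 2 →
    ∀ d : PySem.Dict Int Int,
    (∀ j : Int, d.get? j =
      if (a : Int) < j ∧ j ≤ (bank.length : Int) - 2 then some (sufmax bank j.toNat) else none) →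
    ∀ j : Int,
      ((PySem.List.pyRange (a : Int) (-1) (-1)).foldl (fun d index =>
        if d.contains (index + 1) then
          d.insert index (max (d.getD (index + 1) 0) (PySem.List.pyGetD bank (index + 1) 0))
        else
          d.insert index (PySem.List.pyGetD bank (index + 1) 0)) d).get? j =
      if 0 ≤ j ∧ j ≤ (bank.length : Int) - 2 then some (sufmax bank j.toNat) else none := by
  intro a
  induction a with
  | zero =>
    intro ha d hd j
    rw [PySem.List.pyRange_neg_one_cons (by omega), PySem.List.pyRange_neg_one_eq_nil (by omega)]
    simp only [List.foldl_cons, List.foldl_nil, Nat.cast_zero] at *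
    have := dict_step bank 0 (by exact_mod_cast ha) d (by exact_mod_cast hd) j
    simp only [Nat.cast_zero] at this
    rw [this]
    by_cases h1 : 0 ≤ j ∧ j ≤ (bank.length : Int) - 2
    · rw [if_pos (by omega), if_pos h1]
    · rw [if_neg (by omega), if_neg h1]
  | succ a ih =>
    intro ha d hd j
    rw [PySem.List.pyRange_neg_one_cons (by omega)]
    simp only [List.foldl_cons]
    have hstep := dict_step bank (a + 1) (by exact_mod_cast ha) d (by exact_mod_cast hd)
    rw [show ((a + 1 : Nat) : Int) - 1 = ((a : Nat) : Int) by push_cast; ring]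
    refine ih (by push_cast at ha ⊢; omega) _ (fun j' => ?_) j
    have := hstep j'
    push_cast at this ⊢
    rw [this]
    by_cases hh : (a : Int) < j' ∧ j' ≤ (bank.length : Int) - 2
    · rw [if_pos (by omega), if_pos hh]
    · rw [if_neg (by omega), if_neg hh]

-- A's second loop equals the fold of cval over the ascending index range
theorem contribA (bank : List Int) :
    (PySem.List.pyRange 0 ((bank.length : Int) - 1) 1).foldl (fun cm index =>
      max cm (pyConcat (PySem.List.pyGetD bank index 0)
        (((PySem.List.pyRange ((bank.length : Int) - 2) (-1) (-1)).foldl (fun d index =>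
            if d.contains (index + 1) then
              d.insert index (max (d.getD (index + 1) 0) (PySem.List.pyGetD bank (index + 1) 0))
            else
              d.insert index (PySem.List.pyGetD bank (index + 1) 0)) PySem.Dict.empty).getD index 0))) 0
    = (PySem.List.pyRange 0 ((bank.length : Int) - 1) 1).foldl (fun cm index =>
        max cm (cval bank index)) 0 := by
  by_cases h2 : 2 ≤ bank.length
  · have hc : ((bank.length - 2 : Nat) : Int) = (bank.length : Int) - 2 := by omega
    have hdict := dict_inv bank (bank.length - 2) (by omega) PySem.Dict.empty
      (fun j => by rw [PySem.Dict.get?_empty, if_neg (by omega)])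
    rw [hc] at hdict
    apply PySem.List.foldl_congr_mem
    intro acc x hx
    rw [PySem.List.mem_pyRange_one] at hx
    rw [PySem.Dict.getD_eq_get?_getD, hdict x, if_pos (by omega)]
    simp [cval]
  · rw [PySem.List.pyRange_one_eq_nil (by omega)]
    simp only [List.foldl_nil]

-- B's loop after its first iteration: running is the suffix max, best folds cval
theorem foldB (bank : List Int) : ∀ (a : Nat) (v : Int),
    (a : Int) + 1 ≤ (bank.length : Int) - 2 →
    (((PySem.List.pyRange (a : Int) (-1) (-1)).foldl
        (fun (p : Int × Option Int) i =>
          let running :=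
            match p.2 with
            | none => PySem.List.pyGetD bank (i + 1) 0
            | some r => max r (PySem.List.pyGetD bank (i + 1) 0)
          (max p.1 (pyConcat (PySem.List.pyGetD bank i 0) running), some running))
        (v, some (sufmax bank (a + 1))))).1
    = (PySem.List.pyRange (a : Int) (-1) (-1)).foldl (fun cm i => max cm (cval bank i)) v := by
  intro a
  induction a with
  | zero =>
    intro v h
    rw [PySem.List.pyRange_neg_one_cons (by omega), PySem.List.pyRange_neg_one_eq_nil (by omega)]
    simp only [List.foldl_cons, List.foldl_nil, Nat.cast_zero]
    rw [show ((0 : Int) + 1) = ((0 : Nat) : Int) + 1 by norm_num,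
        running_upd bank 0 (by push_cast at h; omega)]
    unfold cval
    norm_num
  | succ a ih =>
    intro v h
    rw [PySem.List.pyRange_neg_one_cons (by omega)]
    simp only [List.foldl_cons]
    have hupd : max (sufmax bank (a + 1 + 1)) (PySem.List.pyGetD bank (((a + 1 : Nat) : Int) + 1) 0)
        = sufmax bank (a + 1) := by
      have := running_upd bank (a + 1) (by push_cast at h; omega)
      push_cast at this ⊢
      exact this
    rw [hupd]
    have hc : ((a + 1 : Nat) : Int) - 1 = ((a : Nat) : Int) := by push_cast; ring
    rw [hc]
    have := ih (max v (cval bank ((a + 1 : Nat) : Int))) (by push_cast at h ⊢; omega)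
    unfold cval at this ⊢
    have ht : (((a + 1 : Nat) : Int)).toNat = a + 1 := by omega
    rw [ht] at this ⊢
    exact this

theorem foldl_max_shift (g : Int → Int) (l : List Int) (v x : Int) :
    l.foldl (fun acc y => max acc (g y)) (max v (g x))
    = max (l.foldl (fun acc y => max acc (g y)) v) (g x) := by
  induction l generalizing v with
  | nil => rfl
  | cons y ys ih =>
    simp only [List.foldl_cons]
    rw [show max (max v (g x)) (g y) = max (max v (g y)) (g x) by
      rw [max_assoc, max_comm (g x), ← max_assoc]]
    exact ih (max v (g y))

theorem foldl_max_reverse (g : Int → Int) (l : List Int) (v : Int) :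
    l.reverse.foldl (fun acc y => max acc (g y)) v = l.foldl (fun acc y => max acc (g y)) v := by
  induction l generalizing v with
  | nil => rfl
  | cons x xs ih =>
    simp only [List.reverse_cons, List.foldl_append, List.foldl_cons, List.foldl_nil]
    rw [ih]
    exact (foldl_max_shift g xs v x).symm

-- B's whole per-bank loop equals the same ascending fold of cval
theorem contribB (bank : List Int) :
    (((PySem.List.pyRange ((bank.length : Int) - 2) (-1) (-1)).foldl
        (fun (p : Int × Option Int) i =>
          let running :=
            match p.2 with
            | none => PySem.List.pyGetD bank (i + 1) 0
            | some r => max r (PySem.List.pyGetD bank (i + 1) 0)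
          (max p.1 (pyConcat (PySem.List.pyGetD bank i 0) running), some running))
        (0, none))).1
    = (PySem.List.pyRange 0 ((bank.length : Int) - 1) 1).foldl (fun cm i => max cm (cval bank i)) 0 := by
  by_cases h2 : 2 ≤ bank.length
  · have hrev : PySem.List.pyRange ((bank.length : Int) - 2) (-1) (-1)
        = (PySem.List.pyRange 0 ((bank.length : Int) - 1) 1).reverse := by
      rw [PySem.List.pyRange_neg_one_eq_reverse]
      rw [show (-1 : Int) + 1 = 0 from rfl, show (bank.length : Int) - 2 + 1 = (bank.length : Int) - 1 by ring]
    rw [show (PySem.List.pyRange 0 ((bank.length : Int) - 1) 1).foldl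
          (fun cm i => max cm (cval bank i)) 0
        = (PySem.List.pyRange ((bank.length : Int) - 2) (-1) (-1)).foldl
          (fun cm i => max cm (cval bank i)) 0 by rw [hrev, foldl_max_reverse]]
    rw [PySem.List.pyRange_neg_one_cons (by omega)]
    simp only [List.foldl_cons]
    have hlast : PySem.List.pyGetD bank ((bank.length : Int) - 2 + 1) 0
        = sufmax bank (bank.length - 2) := by
      rw [sufmax_last bank (bank.length - 2) (by omega)]
      congr 1
      omega
    rw [hlast]
    have hcv : pyConcat (PySem.List.pyGetD bank ((bank.length : Int) - 2) 0)
        (sufmax bank (bank.length - 2)) = cval bank ((bank.length : Int) - 2) := by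
      unfold cval
      congr 2
      omega
    rw [hcv]
    by_cases h3 : 3 ≤ bank.length
    · have hc3 : (bank.length : Int) - 2 - 1 = ((bank.length - 3 : Nat) : Int) := by omega
      rw [hc3]
      have hsm : sufmax bank (bank.length - 2) = sufmax bank ((bank.length - 3) + 1) := by
        congr 1
        omega
      rw [hsm]
      exact foldB bank (bank.length - 3) (max 0 (cval bank ((bank.length : Int) - 2)))
        (by omega)
    · rw [PySem.List.pyRange_neg_one_eq_nil (by omega)]
      simp only [List.foldl_nil]
  · rw [PySem.List.pyRange_neg_one_eq_nil (by omega), PySem.List.pyRange_one_eq_nil (by omega)]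
    simp only [List.foldl_nil]

-- ===== VERDICT (by name: the statement is the Claim_ definition above) =====
theorem solution_spec : Claim_equal_solution := by
  intro batteries _hdom _hpre
  unfold Spec_solution solution solution_alt
  congr 1
  funext acc bank
  simp only []
  congr 1
  exact (contribA bank).trans (contribB bank).symm
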